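-- pv_equiv track=rewrite | github.com/RThomas96/AnkiMarkdownImporter | myaddon/fileParser.py | _extractTagsFromMarkdownQuestion
-- ===== SOURCE A (Python) =====
-- def _extractTagsFromMarkdownQuestion(question_with_tags):
--     # It is possible to '#' in the question if this is code !!
--     markerInCode = "`" in question_with_tags
--     if markerInCode:
--         question_no_code = question_with_tags.split("`")
--         tags = question_no_code[-1].split('#')
--     else:
--         tags = question_with_tags.split('#')
--
--     tags = [t for t in tags if t] #Remove empty strings
--     tags = [t.strip() for t in tags]
--     if not tags:
--         return [], []
--     question = tags[0]
--     if markerInCode: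
--         question = "`".join(question_no_code[:-1])+"`"+question
--     tags = tags[1:]
--     return question, tags
-- ===== SOURCE B (Python) =====
-- def _extractTagsFromMarkdownQuestion(question_with_tags):
--     # One right-to-left character scan (state machine), no split/join passes.
--     prefix = None       # reversed chars of the part up to and incl. the last '`'
--     done = []           # completed '#'-pieces after the last '`' (rightmost first, chars reversed)
--     cur = []            # piece currently being collected (chars reversed)
--     for c in reversed(question_with_tags):
--         if prefix is not None:
--             prefix.append(c)
--         elif c == '`':
--             prefix = [c]
--         elif c == '#':
--             done.append(cur)
--             cur = []
--         else:
--             cur.append(c)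
--     pieces = [''.join(reversed(p)) for p in [cur] + done[::-1]]
--     pre = ''.join(reversed(prefix)) if prefix is not None else ''
--     tags = [p.strip() for p in pieces if p]
--     if not tags:
--         return "", []
--     return pre + tags[0], tags[1:]
-- ===== Notes on version B (the rewrite author's own statement) =====
-- stated objective: alternative
-- what changed: Replaced A's staged library passes (split('`'), split('#'), filter, strip, '`'.join reconstruction) by a single right-to-left character scan: a state machine with accumulators for the prefix up to the last backtick, the completed '#'-pieces and the current piece, so neither split nor join is ever called.
-- outside the precondition, e.g. on _extractTagsFromMarkdownQuestion(''): A returns ([], []), B returns ('', []); on _extractTagsFromMarkdownQuestion('#'): A returns ([], []), B returns ('', []); on _extractTagsFromMarkdownQuestion('`'): A returns ([], []), B returns ('', [])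
import Mathlib
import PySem

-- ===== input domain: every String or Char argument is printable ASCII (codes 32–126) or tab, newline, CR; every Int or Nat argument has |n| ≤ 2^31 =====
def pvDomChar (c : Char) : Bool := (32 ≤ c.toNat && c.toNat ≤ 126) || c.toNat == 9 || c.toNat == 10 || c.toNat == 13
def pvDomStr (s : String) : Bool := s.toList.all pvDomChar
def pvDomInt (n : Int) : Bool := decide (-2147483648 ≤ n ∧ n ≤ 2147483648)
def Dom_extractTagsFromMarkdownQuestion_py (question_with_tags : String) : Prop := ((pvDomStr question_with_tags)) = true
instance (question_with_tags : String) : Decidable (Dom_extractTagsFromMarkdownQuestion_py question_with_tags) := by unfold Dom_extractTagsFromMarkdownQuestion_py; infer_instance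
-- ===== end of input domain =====

-- B replaces A's staged split/filter/join-reconstruction passes by ONE right-to-left character
-- scan (a state machine with prefix/done/cur accumulators); objective: alternative, same O(n).

-- ===== PORT A =====
-- literal transliteration of _extractTagsFromMarkdownQuestion (Source A)
def extractTagsFromMarkdownQuestion_py (question_with_tags : String) : String × List String :=
  let s := question_with_tags.toList
  let markerInCode := PySem.Chars.isIn ['`'] s                       -- "`" in question_with_tags
  let question_no_code := PySem.Chars.splitOn s ['`']                -- question_with_tags.split("`")
  let tags :=
    if markerInCode then
      PySem.Chars.splitOn ((PySem.List.pyGet? question_no_code (-1)).getD []) ['#']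
      -- question_no_code[-1].split('#'); splitOn never returns [], so pyGet? is provably some
    else
      PySem.Chars.splitOn s ['#']                                    -- question_with_tags.split('#')
  let tags := tags.filter (fun t => !t.isEmpty)                      -- [t for t in tags if t]
  let tags := tags.map PySem.Chars.strip                             -- [t.strip() for t in tags]
  match tags with
  | [] => ("", [])        -- Python returns ([], []) here, not a str: these inputs are outside Pre_
  | q0 :: rest =>         -- question = tags[0]; tags = tags[1:]
    let question :=
      if markerInCode then
        PySem.Chars.join ['`'] (PySem.List.slice question_no_code none (some (-1))) ++ ['`'] ++ q0
        -- "`".join(question_no_code[:-1])+"`"+question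
      else q0
    (String.ofList question, rest.map String.ofList)

-- ===== PORT B =====
-- literal transliteration of Source B: the loop body (one step of the reverse scan)
def pvStepB (st : Option (List Char) × List (List Char) × List Char) (c : Char) :
    Option (List Char) × List (List Char) × List Char :=
  match st with
  | (some p, done, cur) => (some (p ++ [c]), done, cur)              -- prefix.append(c)
  | (none, done, cur) =>
    if c = '`' then (some [c], done, cur)                            -- prefix = [c]
    else if c = '#' then (none, done ++ [cur], [])                   -- done.append(cur); cur = []
    else (none, done, cur ++ [c])                                    -- cur.append(c)

def extractTagsFromMarkdownQuestion_py_alt (question_with_tags : String) : String × List String :=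
  -- for c in reversed(question_with_tags): …
  let st := question_with_tags.toList.reverse.foldl pvStepB (none, [], [])
  let pieces := ([st.2.2] ++ st.2.1.reverse).map List.reverse        -- [''.join(reversed(p)) for p in [cur]+done[::-1]]
  let pre := (st.1.map List.reverse).getD []                         -- ''.join(reversed(prefix)) if … else ''
  let tags := (pieces.filter (fun t => !t.isEmpty)).map PySem.Chars.strip   -- [p.strip() for p in pieces if p]
  match tags with
  | [] => ("", [])
  | q0 :: rest => (String.ofList (pre ++ q0), rest.map String.ofList)

-- ===== PRECONDITION & SPEC =====
-- Pre_ excludes exactly the inputs whose part after the last backtick consists of '#' only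
-- (possibly empty): there Python A returns ([], []), a pair of lists where a str is declared —
-- not a value of the result type (B returns ('', []) there).
def Pre_extractTagsFromMarkdownQuestion_py (question_with_tags : String) : Prop :=
  (question_with_tags.toList.reverse.takeWhile (fun c => c ≠ '`')).any (fun c => c != '#') = true
instance (question_with_tags : String) : Decidable (Pre_extractTagsFromMarkdownQuestion_py question_with_tags) := by unfold Pre_extractTagsFromMarkdownQuestion_py; infer_instance

def pvWitness_extractTagsFromMarkdownQuestion_py : String := "a`b #t"

def Spec_extractTagsFromMarkdownQuestion_py (question_with_tags : String) (out : String × List String) : Prop := out = extractTagsFromMarkdownQuestion_py_alt question_with_tags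
instance (question_with_tags : String) (out : String × List String) : Decidable (Spec_extractTagsFromMarkdownQuestion_py question_with_tags out) := by unfold Spec_extractTagsFromMarkdownQuestion_py; infer_instance

-- ===== CLAIM (what is proved, stated in full; the proofs are below) =====
def Claim_equal_extractTagsFromMarkdownQuestion_py : Prop := ∀ (question_with_tags : String), Dom_extractTagsFromMarkdownQuestion_py question_with_tags → Pre_extractTagsFromMarkdownQuestion_py question_with_tags → Spec_extractTagsFromMarkdownQuestion_py question_with_tags (extractTagsFromMarkdownQuestion_py question_with_tags)

-- ===== LEMMAS AND PROOFS =====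

-- simple structural model of Python's split on a single-character separator
def pvSp (c : Char) : List Char → List (List Char)
  | [] => [[]]
  | x :: xs => if x = c then [] :: pvSp c xs else (pvSp c xs).modifyHead (x :: ·)

theorem pvSp_ne_nil (c : Char) (l : List Char) : pvSp c l ≠ [] := by
  induction l with
  | nil => simp [pvSp]
  | cons x xs ih =>
    simp only [pvSp]
    split
    · simp
    · cases h : pvSp c xs with
      | nil => exact absurd h ih
      | cons p ps => simp

theorem pvModifyHead_append {α : Type} (f : α → α) (X Y : List α) (h : X ≠ []) :
    (X ++ Y).modifyHead f = X.modifyHead f ++ Y := by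
  cases X with
  | nil => exact absurd rfl h
  | cons a as => simp

theorem pvPrefixOf_singleton (c x : Char) (xs : List Char) :
    [c].isPrefixOf (x :: xs) = (c == x) := by
  simp [List.isPrefixOf]

theorem pvGo_spec (c : Char) (fuel : Nat) :
    ∀ (l cur : List Char) (acc : List (List Char)), l.length ≤ fuel →
      PySem.Chars.splitOn.go [c] fuel l cur acc
        = acc.reverse ++ (pvSp c l).modifyHead (cur.reverse ++ ·) := by
  induction fuel with
  | zero =>
    intro l cur acc h
    have hl : l = [] := by
      cases l with
      | nil => rfl
      | cons a as => simp at h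
    subst hl
    rw [PySem.Chars.splitOn.go.eq_def]
    simp [pvSp]
  | succ fuel ih =>
    intro l cur acc h
    cases l with
    | nil =>
      rw [PySem.Chars.splitOn.go.eq_def]
      simp [pvSp]
    | cons x xs =>
      rw [PySem.Chars.splitOn.go.eq_def]
      simp only [pvPrefixOf_singleton, pvSp]
      by_cases hx : c = x
      · subst hx
        simp only [beq_self_eq_true, if_pos, List.length_singleton, List.drop_one,
          List.tail_cons, if_true]
        rw [ih xs [] (cur.reverse :: acc) (by simpa using Nat.le_of_succ_le_succ h)]
        cases hsp : pvSp c xs with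
        | nil => exact absurd hsp (pvSp_ne_nil c xs)
        | cons p ps => simp
      · have hbx : (c == x) = false := by simp [hx]
        have hxc : ¬ x = c := fun hh => hx hh.symm
        simp only [hbx, if_neg, Bool.false_eq_true, if_false, hxc, ite_false]
        rw [ih xs (x :: cur) acc (by simpa using Nat.le_of_succ_le_succ h)]
        rw [List.modifyHead_modifyHead]
        congr 1
        congr 1
        funext t
        simp

theorem pvSplitOn_singleton (c : Char) (s : List Char) :
    PySem.Chars.splitOn s [c] = pvSp c s := by
  unfold PySem.Chars.splitOn
  rw [pvGo_spec c (s.length + 1) s [] [] (Nat.le_succ _)]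
  simp
  cases h : pvSp c s with
  | nil => exact absurd h (pvSp_ne_nil c s)
  | cons p ps => simp

theorem pvSp_no_sep (c : Char) (v : List Char) (h : c ∉ v) : pvSp c v = [v] := by
  induction v with
  | nil => rfl
  | cons x xs ih =>
    have hx : ¬ x = c := fun hh => h (by simp [hh])
    simp only [pvSp, hx, ite_false]
    rw [ih (fun hm => h (List.mem_cons_of_mem _ hm))]
    simp

theorem pvSp_last (c : Char) (u v : List Char) (hv : c ∉ v) :
    pvSp c (u ++ c :: v) = pvSp c u ++ [v] := by
  induction u with
  | nil => simp [pvSp, pvSp_no_sep c v hv]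
  | cons x xs ih =>
    by_cases hx : x = c
    · subst hx
      simp only [List.cons_append, pvSp, if_pos rfl, ih]
      simp
    · simp only [List.cons_append, pvSp, if_neg hx, ih]
      rw [pvModifyHead_append _ _ _ (pvSp_ne_nil c xs)]

theorem pvJoin_sp (c : Char) (u : List Char) : PySem.Chars.join [c] (pvSp c u) = u := by
  induction u with
  | nil => rfl
  | cons x xs ih =>
    by_cases hx : x = c
    · subst hx
      simp only [pvSp, if_pos rfl]
      cases hsp : pvSp x xs with
      | nil => exact absurd hsp (pvSp_ne_nil x xs)
      | cons p ps =>
        rw [hsp] at ih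
        simp [PySem.Chars.join, List.intercalate] at ih ⊢
        simpa using ih
    · simp only [pvSp, if_neg hx]
      cases hsp : pvSp c xs with
      | nil => exact absurd hsp (pvSp_ne_nil c xs)
      | cons p ps =>
        rw [hsp] at ih
        cases ps with
        | nil =>
          simp [PySem.Chars.join, List.intercalate] at ih ⊢
          simp [ih]
        | cons q qs =>
          simp [PySem.Chars.join, List.intercalate] at ih ⊢
          simpa using ih

theorem pvInfix_singleton (c : Char) (l : List Char) : [c] <:+: l ↔ c ∈ l := by
  constructor
  · rintro ⟨p, q, rfl⟩
    simp
  · intro h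
    obtain ⟨p, q, rfl⟩ := List.append_of_mem h
    exact ⟨p, q, by simp⟩

theorem pvExists_last_occ (c : Char) (s : List Char) (h : c ∈ s) :
    ∃ u v, s = u ++ c :: v ∧ c ∉ v := by
  induction s using List.reverseRecOn with
  | nil => simp at h
  | append_singleton xs x ih =>
    by_cases hx : x = c
    · subst hx
      exact ⟨xs, [], by simp, by simp⟩
    · have hm : c ∈ xs := by
        rcases List.mem_append.mp h with h1 | h1
        · exact h1
        · simp at h1; exact absurd h1.symm hx
      obtain ⟨u, v, rfl, hv⟩ := ih hm
      exact ⟨u, v ++ [x], by simp, by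
        intro hmem
        rcases List.mem_append.mp hmem with h2 | h2
        · exact hv h2
        · simp at h2; exact hx h2.symm⟩

-- B's scan over the reversed string, while no backtick has been seen, computes the
-- '#'-split of the unreversed text (pieces reversed, in reversed order).
theorem pvFoldB_no_tick (s : List Char) (h : '`' ∉ s) :
    List.foldl pvStepB (none, [], []) s.reverse
      = (none, ((pvSp '#' s).tail.map List.reverse).reverse, (pvSp '#' s).headI.reverse) := by
  induction s with
  | nil => simp [pvSp]
  | cons x xs ih =>
    have hx : ¬ x = '`' := fun hh => h (by simp [hh])
    have hxs : '`' ∉ xs := fun hm => h (List.mem_cons_of_mem _ hm)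
    rw [List.reverse_cons, List.foldl_append, ih hxs]
    cases hsp : pvSp '#' xs with
    | nil => exact absurd hsp (pvSp_ne_nil '#' xs)
    | cons h0 t0 =>
      by_cases hh : x = '#'
      · subst hh
        simp [pvStepB, hx, pvSp, hsp]
      · simp [pvStepB, hx, hh, pvSp, hsp]

-- once the prefix is set, the remaining characters are just appended to it
theorem pvFoldB_some (l : List Char) :
    ∀ (p : List Char) (d : List (List Char)) (c : List Char),
      List.foldl pvStepB (some p, d, c) l = (some (p ++ l), d, c) := by
  induction l with
  | nil => intro p d c; simp
  | cons x xs ih =>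
    intro p d c
    simp only [List.foldl_cons, pvStepB, ih]
    simp

theorem pvMain (q : String) :
    extractTagsFromMarkdownQuestion_py q = extractTagsFromMarkdownQuestion_py_alt q := by
  unfold extractTagsFromMarkdownQuestion_py extractTagsFromMarkdownQuestion_py_alt
  by_cases hc : '`' ∈ q.toList
  · obtain ⟨u, v, hs, hv⟩ := pvExists_last_occ '`' q.toList hc
    have hin : PySem.Chars.isIn ['`'] q.toList = true :=
      (PySem.Chars.isIn_iff_infix _ _).mpr ((pvInfix_singleton _ _).mpr hc)
    have hsplit : PySem.Chars.splitOn q.toList ['`'] = pvSp '`' u ++ [v] := by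
      rw [pvSplitOn_singleton, hs, pvSp_last '`' u v hv]
    have hlast : (PySem.List.pyGet? (PySem.Chars.splitOn q.toList ['`']) (-1)).getD [] = v := by
      rw [hsplit, PySem.List.pyGet?_neg_one_append_singleton]
      rfl
    have hdl : PySem.List.slice (PySem.Chars.splitOn q.toList ['`']) none (some (-1))
        = pvSp '`' u := by
      rw [PySem.List.slice_to_neg_one, hsplit, List.dropLast_concat]
    have hfold : List.foldl pvStepB (none, [], []) q.toList.reverse
        = (some ('`' :: u.reverse),
           ((pvSp '#' v).tail.map List.reverse).reverse, (pvSp '#' v).headI.reverse) := by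
      have hrev : q.toList.reverse = (v.reverse ++ ['`']) ++ u.reverse := by
        rw [hs]; simp
      rw [hrev, List.foldl_append, List.foldl_append, pvFoldB_no_tick v hv]
      have h1 : List.foldl pvStepB
          (none, ((pvSp '#' v).tail.map List.reverse).reverse, (pvSp '#' v).headI.reverse) ['`']
          = (some ['`'], ((pvSp '#' v).tail.map List.reverse).reverse, (pvSp '#' v).headI.reverse) := by
        simp [pvStepB]
      rw [h1, pvFoldB_some]
      rfl
    have hpieces :
        (([((pvSp '#' v).headI.reverse)] ++ (((pvSp '#' v).tail.map List.reverse).reverse).reverse).map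
          List.reverse) = pvSp '#' v := by
      cases hsp : pvSp '#' v with
      | nil => exact absurd hsp (pvSp_ne_nil '#' v)
      | cons h0 t0 => simp [List.map_map]
    simp only [hin, if_true, hlast, hdl, hfold, hpieces]
    cases htags : (((PySem.Chars.splitOn v ['#']).filter (fun t => !t.isEmpty)).map
        PySem.Chars.strip) with
    | nil =>
      rw [pvSplitOn_singleton] at htags
      simp [htags]
    | cons q0 rest =>
      rw [pvSplitOn_singleton] at htags
      simp only [Option.map_some, Option.getD_some, List.reverse_cons, List.reverse_reverse,
        htags, pvJoin_sp]
  · have hin : PySem.Chars.isIn ['`'] q.toList = false :=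
      (PySem.Chars.isIn_eq_false_iff _ _).mpr (fun hi => hc ((pvInfix_singleton _ _).mp hi))
    have hfold := pvFoldB_no_tick q.toList hc
    have hpieces :
        (([((pvSp '#' q.toList).headI.reverse)] ++ (((pvSp '#' q.toList).tail.map List.reverse).reverse).reverse).map
          List.reverse) = pvSp '#' q.toList := by
      cases hsp : pvSp '#' q.toList with
      | nil => exact absurd hsp (pvSp_ne_nil '#' q.toList)
      | cons h0 t0 => simp [List.map_map]
    simp only [hin, Bool.false_eq_true, if_false, hfold, hpieces]
    cases htags : (((PySem.Chars.splitOn q.toList ['#']).filter (fun t => !t.isEmpty)).map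
        PySem.Chars.strip) with
    | nil =>
      rw [pvSplitOn_singleton] at htags
      simp [htags]
    | cons q0 rest =>
      rw [pvSplitOn_singleton] at htags
      simp [htags]

-- ===== VERDICT (by name: the statement is the Claim_ definition above) =====
theorem extractTagsFromMarkdownQuestion_py_spec : Claim_equal_extractTagsFromMarkdownQuestion_py := by
  intro q _ _
  unfold Spec_extractTagsFromMarkdownQuestion_py
  exact pvMain q
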